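-- pv_equiv track=rewrite | github.com/rana22/hugging-face-demo | graph/DFS.py | bfs_layers
-- ===== SOURCE A (Python) =====
-- from collections import deque
--
-- def bfs_layers(graph, root="program"):
--     visited = set()
--     queue = deque([(root, [root])])
--
--     paths = []
--
--     while queue:
--         node, path = queue.popleft()
--
--         if node in visited:
--             continue
--
--         visited.add(node)
--         paths.append(path)
--
--         for child in graph.get(node, []):
--             if child not in path:
--                 queue.append((child, path + [child]))
--
--     return paths
-- ===== SOURCE B (Python) =====
-- def bfs_layers(graph, root="program"):
--     # Two-list (front/back) FIFO queue of (node, parent) pairs; first-visit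
--     # parents go into a dict and each recorded path is rebuilt by walking
--     # parent pointers back to the root, instead of copying paths per entry.
--     parent = {}
--     paths = []
--     front = [(root, None)]
--     back = []
--     while front or back:
--         if not front:
--             front, back = back, []
--         node, par = front.pop(0)
--         if node in parent:
--             continue
--         parent[node] = par
--         path = []
--         cur = node
--         while cur is not None:
--             path.append(cur)
--             cur = parent[cur]
--         path.reverse()
--         paths.append(path)
--         for child in graph.get(node, []):
--             if child not in path:
--                 back.append((child, node))
--     return paths
-- ===== Notes on version B (the rewrite author's own statement) =====
-- stated objective: alternative
-- what changed: The single path-carrying deque is replaced by a two-list (front/back) queue of constant-size (node, parent) pairs plus a parent dict; each recorded path is reconstructed by walking parent pointers back to the root and reversing.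
import Mathlib
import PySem

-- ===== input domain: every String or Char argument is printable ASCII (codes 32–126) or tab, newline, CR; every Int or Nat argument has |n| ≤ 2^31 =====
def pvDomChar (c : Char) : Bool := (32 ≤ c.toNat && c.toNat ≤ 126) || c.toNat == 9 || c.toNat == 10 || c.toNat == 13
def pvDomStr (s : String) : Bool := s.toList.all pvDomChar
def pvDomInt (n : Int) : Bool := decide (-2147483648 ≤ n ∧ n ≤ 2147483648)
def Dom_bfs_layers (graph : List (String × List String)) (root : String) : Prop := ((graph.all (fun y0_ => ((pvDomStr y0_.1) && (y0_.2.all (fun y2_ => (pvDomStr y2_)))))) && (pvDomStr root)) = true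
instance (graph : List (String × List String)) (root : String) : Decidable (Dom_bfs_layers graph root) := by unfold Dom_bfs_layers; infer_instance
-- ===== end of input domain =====

-- B replaces A's path-carrying deque by a two-list (front/back) queue of (node, parent)
-- pairs plus a parent dict; paths are rebuilt by walking parents. Alternative data
-- structure, not claimed faster.

-- Fuel shared by both ports (a termination guard only: the number of pops of either BFS
-- is at most 1 + the number of pushes ≤ 1 + Σ adjacency lengths, so the fuel branch is
-- never the one that returns).
def bfsFuel (graph : List (String × List String)) : Nat :=
  1 + graph.length + (graph.map (fun kv => kv.2.length)).sum

-- ===== PORT A =====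
-- while queue: pop head; skip visited; record path; enqueue unseen children with path ++ [child]
def aLoop (graph : List (String × List String)) :
    Nat → List (String × List String) → PySem.Set String → List (List String) → List (List String)
  | 0, _, _, paths => paths
  | _ + 1, [], _, paths => paths
  | fuel + 1, (node, path) :: q, visited, paths =>
    if PySem.Set.contains visited node then
      aLoop graph fuel q visited paths
    else
      aLoop graph fuel
        (q ++ (((List.lookup node graph).getD []).filter
                  (fun c => !(path.contains c))).map (fun c => (c, path ++ [c])))
        (PySem.Set.add visited node) (paths ++ [path])

def bfs_layers (graph : List (String × List String)) (root : String) : List (List String) :=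
  aLoop graph (bfsFuel graph) [(root, [root])] PySem.Set.empty []

-- ===== PORT B =====
-- 'while cur is not None: path.append(cur); cur = parent[cur]' — cur is always a key of
-- parent here, so 'parent[cur]' is ported exactly as getD with a never-used default; the
-- fuel (dict size + 1) is a termination guard only: a parent chain never repeats a key.
def bWalk : Nat → PySem.Dict String (Option String) → Option String → List String → List String
  | 0, _, _, acc => acc
  | _ + 1, _, none, acc => acc
  | f + 1, par, some c, acc => bWalk f par (par.getD c none) (acc ++ [c])

-- 'while front or back: if not front: front, back = back, []; node, par = front.pop(0); …'
def bLoop (graph : List (String × List String)) :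
    Nat → List (String × Option String) → List (String × Option String) →
    PySem.Dict String (Option String) → List (List String) → List (List String)
  | 0, _, _, _, paths => paths
  | fuel + 1, front, back, parent, paths =>
    match (if front.isEmpty then (back, ([] : List (String × Option String))) else (front, back)) with
    | ([], _) => paths
    | ((node, par) :: f, b) =>
      if parent.contains node then
        bLoop graph fuel f b parent paths
      else
        let parent' := parent.insert node par
        let path := (bWalk (parent'.size + 1) parent' (some node) []).reverse
        bLoop graph fuel f
          (((List.lookup node graph).getD []).foldl
             (fun acc c => if !(path.contains c) then acc ++ [(c, some node)] else acc) b)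
          parent' (paths ++ [path])

def bfs_layers_alt (graph : List (String × List String)) (root : String) : List (List String) :=
  bLoop graph (bfsFuel graph) [(root, none)] [] PySem.Dict.empty []

-- ===== PRECONDITION & SPEC =====
def Spec_bfs_layers (graph : List (String × List String)) (root : String) (out : List (List String)) : Prop := out = bfs_layers_alt graph root
instance (graph : List (String × List String)) (root : String) (out : List (List String)) : Decidable (Spec_bfs_layers graph root out) := by unfold Spec_bfs_layers; infer_instance

-- ===== CLAIM (what is proved, stated in full; the proofs are below) =====
def Claim_equal_bfs_layers : Prop := ∀ (graph : List (String × List String)) (root : String), Dom_bfs_layers graph root → Spec_bfs_layers graph root (bfs_layers graph root)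

-- ===== LEMMAS AND PROOFS =====

-- d' extends d: every key of d keeps its value, and d' has at least as many keys.
def DExt (d d' : PySem.Dict String (Option String)) : Prop :=
  d.size ≤ d'.size ∧ ∀ k : String, (d.get? k).isSome → d'.get? k = d.get? k

theorem DExt_trans {d1 d2 d3 : PySem.Dict String (Option String)}
    (h12 : DExt d1 d2) (h23 : DExt d2 d3) : DExt d1 d3 := by
  refine ⟨le_trans h12.1 h23.1, fun k hk => ?_⟩
  rw [h23.2 k (by rw [h12.2 k hk]; exact hk), h12.2 k hk]

theorem DExt_insert_fresh (d : PySem.Dict String (Option String)) (k : String)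
    (v : Option String) (hk : d.contains k = false) : DExt d (d.insert k v) := by
  constructor
  · rw [PySem.Dict.size_insert]; simp [hk]
  · intro k' hk'
    have hne : k' ≠ k := by
      intro h; subst h
      rw [PySem.Dict.contains_eq_isSome_get?] at hk
      simp [hk'] at hk
    rw [PySem.Dict.get?_insert_of_ne d v hne]

-- The invariant tying an A-queue entry (node, path) to the B-queue entry (node, parentOpt):
-- path = pref ++ [node], and in every extension of the current parent dict the walk from
-- parentOpt yields pref reversed (in at most pref.length steps, which the dict size bounds).
def EntryInv (parent : PySem.Dict String (Option String))
    (e : String × List String) (e' : String × Option String) : Prop :=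
  e'.1 = e.1 ∧ ∃ pref, e.2 = pref ++ [e.1] ∧ pref.length ≤ parent.size ∧
    ∀ d' acc f, DExt parent d' → pref.length ≤ f → bWalk f d' e'.2 acc = acc ++ pref.reverse

theorem EntryInv_mono {parent parent' : PySem.Dict String (Option String)}
    (hext : DExt parent parent') {e e'} (h : EntryInv parent e e') :
    EntryInv parent' e e' := by
  obtain ⟨h1, pref, hp, hlen, hwalk⟩ := h
  exact ⟨h1, pref, hp, le_trans hlen hext.1,
    fun d' acc f hd hf => hwalk d' acc f (DExt_trans hext hd) hf⟩

-- The key sets agree pointwise after a simultaneous add/insert.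
theorem contains_add_insert (visited : PySem.Set String)
    (parent : PySem.Dict String (Option String)) (node : String) (po : Option String)
    (h : ∀ s : String, PySem.Set.contains visited s = parent.contains s) :
    ∀ s : String, PySem.Set.contains (PySem.Set.add visited node) s
      = (parent.insert node po).contains s := by
  intro s
  rw [Bool.eq_iff_iff, PySem.Set.contains_iff, PySem.Set.mem_add, PySem.Dict.contains_insert,
    Bool.or_eq_true, beq_iff_eq, ← h s, ← PySem.Set.contains_iff]
  tauto

-- Main loop correspondence: with agreeing key sets, and A's queue related entrywise to
-- front ++ back, the two loops (run on the same fuel) return the same list of paths.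
theorem loop_eq (graph : List (String × List String)) :
    ∀ (fuel : Nat) (qA : List (String × List String))
      (front back : List (String × Option String))
      (visited : PySem.Set String) (parent : PySem.Dict String (Option String))
      (paths : List (List String)),
      (∀ s : String, PySem.Set.contains visited s = parent.contains s) →
      List.Forall₂ (EntryInv parent) qA (front ++ back) →
      aLoop graph fuel qA visited paths = bLoop graph fuel front back parent paths := by
  intro fuel
  induction fuel with
  | zero => intro qA front back visited parent paths _ _; rfl
  | succ fuel ih =>
    intro qA front back visited parent paths hkeys hq
    -- the entry B pops and the list pair it continues with
    have process : ∀ (node : String) (path : List String) (po : Option String)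
        (qA' : List (String × List String)) (f b : List (String × Option String)),
        EntryInv parent (node, path) (node, po) →
        List.Forall₂ (EntryInv parent) qA' (f ++ b) →
        aLoop graph (fuel + 1) ((node, path) :: qA') visited paths =
          (if parent.contains node then bLoop graph fuel f b parent paths
           else
             let parent' := parent.insert node po
             let path' := (bWalk (parent'.size + 1) parent' (some node) []).reverse
             bLoop graph fuel f
               (((List.lookup node graph).getD []).foldl
                  (fun acc c => if !(path'.contains c) then acc ++ [(c, some node)] else acc) b)
               parent' (paths ++ [path'])) := by
      intro node path po qA' f b hhead htail
      obtain ⟨-, pref, hp, hlen, hwalk⟩ := hhead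
      simp only at hp hwalk
      simp only [aLoop, ← hkeys node]
      by_cases hvis : PySem.Set.contains visited node
      · rw [if_pos hvis, if_pos hvis]
        exact ih qA' f b visited parent paths hkeys htail
      · rw [if_neg hvis, if_neg hvis]
        have hfresh : parent.contains node = false := by
          rw [← hkeys node]; exact Bool.eq_false_iff.mpr hvis
        set parent' := parent.insert node po with hparent'
        have hext : DExt parent parent' := DExt_insert_fresh parent node po hfresh
        have hsize' : parent'.size = parent.size + 1 := by
          rw [hparent', PySem.Dict.size_insert]; simp [hfresh]
        -- the reconstructed path equals A's path
        have hwalk' : bWalk (parent'.size + 1) parent' (some node) [] = node :: pref.reverse := by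
          have hget : parent'.getD node none = po := PySem.Dict.getD_insert_self parent node po none
          rw [hsize', bWalk, hget]
          simpa using hwalk parent' [node] (parent.size + 1) hext
            (le_trans hlen (Nat.le_succ _))
        have hpath : (bWalk (parent'.size + 1) parent' (some node) []).reverse = path := by
          rw [hwalk', hp]; simp
        simp only [hpath]
        -- B's child fold = b ++ the same new entries A appends (with (c, some node) payload)
        rw [PySem.List.foldl_append_if (fun c => !(path.contains c)) (fun c => (c, some node))]
        -- new queue entries remain related
        have hnew : List.Forall₂ (EntryInv parent')
            ((((List.lookup node graph).getD []).filter
                 (fun c => !(path.contains c))).map (fun c => (c, path ++ [c])))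
            ((((List.lookup node graph).getD []).filter
                 (fun c => !(path.contains c))).map (fun c => (c, some node))) := by
          rw [List.forall₂_map_right_iff, List.forall₂_map_left_iff]
          apply List.forall₂_same.mpr
          intro c _
          refine ⟨rfl, path, rfl, ?_, ?_⟩
          · rw [hp, hsize']; simpa using hlen
          · intro d' acc fl hd hf
            rw [hp] at hf
            simp only [List.length_append, List.length_singleton] at hf
            obtain ⟨fl', rfl⟩ : ∃ fl', fl = fl' + 1 := ⟨fl - 1, by omega⟩
            have hgetd : d'.getD node none = po := by
              rw [PySem.Dict.getD_eq_get?_getD, hd.2 node (by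
                rw [hparent', PySem.Dict.get?_insert_self]; rfl),
                hparent', PySem.Dict.get?_insert_self]; rfl
            rw [bWalk, hgetd,
              hwalk d' (acc ++ [node]) fl' (DExt_trans hext hd) (by omega), hp]
            simp
        have hrel : List.Forall₂ (EntryInv parent')
            (qA' ++ (((List.lookup node graph).getD []).filter
                  (fun c => !(path.contains c))).map (fun c => (c, path ++ [c])))
            (f ++ (b ++ (((List.lookup node graph).getD []).filter
                  (fun c => !(path.contains c))).map (fun c => (c, some node)))) := by
          rw [← List.append_assoc]
          exact List.rel_append (htail.imp (fun _ _ h => EntryInv_mono hext h)) hnew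
        exact ih _ _ _ (PySem.Set.add visited node) parent' (paths ++ [path])
          (contains_add_insert visited parent node po hkeys) hrel
    cases front with
    | cons e f =>
      obtain ⟨node, po⟩ := e
      rw [List.cons_append] at hq
      cases hq with
      | @cons eA eB qA' qB' heA htail =>
        obtain ⟨nodeA, path⟩ := eA
        have hn : node = nodeA := heA.1
        subst hn
        have := process node path po qA' f back ⟨rfl, heA.2⟩ htail
        simpa only [bLoop, List.isEmpty_cons, Bool.false_eq_true, if_false] using this
    | nil =>
      cases back with
      | nil =>
        simp only [List.append_nil] at hq
        cases hq with
        | nil => rfl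
      | cons e b =>
        obtain ⟨node, po⟩ := e
        simp only [List.nil_append] at hq
        cases hq with
        | @cons eA eB qA' qB' heA htail =>
          obtain ⟨nodeA, path⟩ := eA
          have hn : node = nodeA := heA.1
          subst hn
          have := process node path po qA' b [] ⟨rfl, heA.2⟩ (by simpa using htail)
          simpa only [bLoop, List.isEmpty_nil, if_true] using this

-- ===== VERDICT (by name: the statement is the Claim_ definition above) =====
theorem bfs_layers_spec : Claim_equal_bfs_layers := by
  intro graph root _
  unfold Spec_bfs_layers bfs_layers bfs_layers_alt
  apply loop_eq
  · intro s
    rw [PySem.Dict.contains_empty]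
    rfl
  · refine List.Forall₂.cons ⟨rfl, [], rfl, Nat.zero_le _, ?_⟩ List.Forall₂.nil
    intro d' acc f _ _
    cases f <;> simp [bWalk]
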